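-- pv_equiv track=rewrite | github.com/asishadhikari/advos-disk-scheduling-simulation | simulation.py | CLOOK_simul
-- ===== SOURCE A (Python) =====
-- import copy
--
-- def CLOOK_simul(req,head):
-- 	req = copy.copy(req)
-- 	cur_head = head
-- 	distance_moved = 0
-- 	max_request = max(req)
-- 	min_request = min(req)
-- 	for i in range(cur_head, min_request-1,-1):
-- 		if (i in req):
-- 			distance_moved += abs(cur_head - i)
-- 			cur_head = i
-- 			req.remove(i)
-- 	distance_moved += abs(cur_head-max_request)
-- 	cur_head = max_request
-- 	for i in range(max_request,head-1,-1):
-- 		if (i in req):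
-- 			distance_moved += abs(cur_head - i)
-- 			cur_head = i
-- 			req.remove(i)
-- 	return distance_moved
-- ===== SOURCE B (Python) =====
-- def CLOOK_simul(req, head):
--     mx = max(req)
--     low = [r for r in req if r <= head]
--     high = [r for r in req if head < r]
--     cur = head if not low else min(low)
--     d = (head - cur) + (mx - cur)
--     if not high:
--         return d
--     return d + (mx - min(high))
-- ===== Notes on version B (the rewrite author's own statement) =====
-- stated objective: faster
-- what changed: Replaces A's iteration over every integer position from head down to min and from max down to head (membership test plus list.remove per position) with a single partition of the requests into those at or below head and those above it, from which the C-LOOK head movement is computed analytically as (head - min(low)) + (max - min(low)) + (max - min(high)).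
-- outside the precondition, e.g. on CLOOK_simul([7, 7, 10], 7): A returns 6, B returns 3
import Mathlib
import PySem

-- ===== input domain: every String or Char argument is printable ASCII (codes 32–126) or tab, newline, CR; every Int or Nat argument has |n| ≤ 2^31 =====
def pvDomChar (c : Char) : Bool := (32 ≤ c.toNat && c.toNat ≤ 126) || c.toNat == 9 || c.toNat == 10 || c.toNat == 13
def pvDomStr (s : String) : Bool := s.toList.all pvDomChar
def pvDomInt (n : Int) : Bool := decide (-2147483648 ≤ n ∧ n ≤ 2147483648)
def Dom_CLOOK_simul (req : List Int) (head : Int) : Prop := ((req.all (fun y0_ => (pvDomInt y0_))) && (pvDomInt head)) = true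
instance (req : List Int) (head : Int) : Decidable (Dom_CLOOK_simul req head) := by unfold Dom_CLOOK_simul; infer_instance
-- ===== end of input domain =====

-- B replaces A's scan over every integer position between min and max (with per-position list membership
-- tests and removals) by one O(n) partition of the requests and a closed-form distance sum.


-- ===== PORT A =====
-- loop body shared by A's two 'for i in range(…, …, -1)' loops: state is (req, cur_head, distance_moved)
def pvStep (st : List Int × Int × Int) (i : Int) : List Int × Int × Int :=
  if i ∈ st.1 then ((PySem.List.remove? st.1 i).getD st.1, i, st.2.2 + |st.2.1 - i|) else st

def CLOOK_simul (req : List Int) (head : Int) : Int :=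
  let cur_head := head
  -- max(req) / min(req) raise ValueError on the empty list: Pre_ excludes req = []
  let max_request := (PySem.List.max? req (fun x => x)).getD 0
  let min_request := (PySem.List.min? req (fun x => x)).getD 0
  let s1 := (PySem.List.pyRange cur_head (min_request - 1) (-1)).foldl pvStep (req, cur_head, 0)
  let d1 := s1.2.2 + |s1.2.1 - max_request|
  let s2 := (PySem.List.pyRange max_request (head - 1) (-1)).foldl pvStep (s1.1, max_request, d1)
  s2.2.2

-- ===== PORT B =====
def CLOOK_simul_alt (req : List Int) (head : Int) : Int :=
  let mx := (PySem.List.max? req (fun x => x)).getD 0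
  let low := req.filter (fun r => decide (r ≤ head))
  let high := req.filter (fun r => decide (head < r))
  let cur := if low = [] then head else (PySem.List.min? low (fun x => x)).getD 0
  let d := (head - cur) + (mx - cur)
  if high = [] then d else d + (mx - (PySem.List.min? high (fun x => x)).getD 0)

-- ===== PRECONDITION & SPEC =====
-- Pre_ excludes the empty list (max([]) raises ValueError in both programs) and lists containing head
-- more than once: there A's one-occurrence-at-a-time removal services the duplicate request at position
-- head on the return sweep (extra travel back from above), while B services every request at the head's
-- own position immediately at zero cost — both service orders are defensible for C-LOOK.
def Pre_CLOOK_simul (req : List Int) (head : Int) : Prop := req ≠ [] ∧ req.count head ≤ 1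
instance (req : List Int) (head : Int) : Decidable (Pre_CLOOK_simul req head) := by unfold Pre_CLOOK_simul; infer_instance
def pvWitness_CLOOK_simul : List Int × Int := ([1, 9, 3], 5)

def Spec_CLOOK_simul (req : List Int) (head : Int) (out : Int) : Prop := out = CLOOK_simul_alt req head
instance (req : List Int) (head : Int) (out : Int) : Decidable (Spec_CLOOK_simul req head out) := by unfold Spec_CLOOK_simul; infer_instance

-- ===== CLAIM (what is proved, stated in full; the proofs are below) =====
def Claim_equal_CLOOK_simul : Prop := ∀ (req : List Int) (head : Int), Dom_CLOOK_simul req head → Pre_CLOOK_simul req head → Spec_CLOOK_simul req head (CLOOK_simul req head)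

-- ===== LEMMAS AND PROOFS =====

-- The downward-range service loop: starting from (req, cur, d) with a ≤ cur, folding pvStep over
-- range(a, b, -1) ends with cur' = the least request value in (b, a] (cur if there is none),
-- d' = d + (cur - cur'), and one occurrence of every request value in (b, a] removed from req.
lemma pvLoop_spec (n : Nat) : ∀ (a b : Int), (a - b).toNat = n →
    ∀ (req : List Int) (cur d : Int), a ≤ cur →
    ∀ (req' : List Int) (c d' : Int),
    (PySem.List.pyRange a b (-1)).foldl pvStep (req, cur, d) = (req', c, d') →
    d' = d + (cur - c)
    ∧ ((c = cur ∧ ∀ r ∈ req, ¬(b < r ∧ r ≤ a))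
       ∨ (c ∈ req ∧ b < c ∧ c ≤ a ∧ ∀ r ∈ req, b < r → r ≤ a → c ≤ r))
    ∧ (∀ j : Int, req'.count j = req.count j - (if b < j ∧ j ≤ a ∧ j ∈ req then 1 else 0)) := by
  induction n with
  | zero =>
    intro a b hn req cur d hc req' c d' hfold
    rw [PySem.List.pyRange_neg_one_eq_nil (by omega)] at hfold
    simp only [List.foldl_nil, Prod.mk.injEq] at hfold
    obtain ⟨rfl, rfl, rfl⟩ := hfold
    refine ⟨by ring, Or.inl ⟨rfl, fun r _ hr => by omega⟩, fun j => ?_⟩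
    rw [if_neg (fun h => by omega : ¬(b < j ∧ j ≤ a ∧ j ∈ req))]
    omega
  | succ n ih =>
    intro a b hn req cur d hc req' c d' hfold
    have hba : b < a := by omega
    rw [PySem.List.pyRange_neg_one_cons hba, List.foldl_cons] at hfold
    by_cases hmem : a ∈ req
    · have hstep : pvStep (req, cur, d) a = (req.erase a, a, d + (cur - a)) := by
        have hrm : PySem.List.remove? req a = some (req.erase a) :=
          PySem.List.remove?_eq_some_erase req a hmem
        simp only [pvStep, hmem, if_pos, hrm, Option.getD_some]
        rw [abs_of_nonneg (by omega : (0:Int) ≤ cur - a)]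
      rw [hstep] at hfold
      obtain ⟨h1, h2, h3⟩ := ih (a - 1) b (by omega) (req.erase a) a (d + (cur - a)) (by omega)
        req' c d' hfold
      refine ⟨by omega, ?_, ?_⟩
      · rcases h2 with ⟨hceq, hnone⟩ | ⟨hm, hb, ha, hlb⟩
        · refine Or.inr ⟨hceq ▸ hmem, by omega, by omega, fun r hr hbr hra => ?_⟩
          by_contra hlt
          exact hnone r ((List.mem_erase_of_ne (by omega : r ≠ a)).mpr hr) ⟨hbr, by omega⟩
        · refine Or.inr ⟨List.mem_of_mem_erase hm, hb, by omega, fun r hr hbr hra => ?_⟩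
          by_cases hr_a : r = a
          · omega
          · exact hlb r ((List.mem_erase_of_ne hr_a).mpr hr) hbr (by omega)
      · intro j
        have hcj := h3 j
        by_cases hja : j = a
        · rw [hja] at hcj ⊢
          rw [List.count_erase_self, if_neg (fun h => by omega)] at hcj
          rw [if_pos ⟨hba, le_refl a, hmem⟩]
          omega
        · rw [List.count_erase_of_ne hja] at hcj
          by_cases hcond : b < j ∧ j ≤ a ∧ j ∈ req
          · rw [if_pos ⟨hcond.1, by omega, (List.mem_erase_of_ne hja).mpr hcond.2.2⟩] at hcj
            rw [if_pos hcond]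
            exact hcj
          · rw [if_neg (fun h => hcond ⟨h.1, by omega, (List.mem_erase_of_ne hja).mp h.2.2⟩)] at hcj
            rw [if_neg hcond]
            exact hcj
    · have hstep : pvStep (req, cur, d) a = (req, cur, d) := by
        simp only [pvStep, hmem, if_false]
      rw [hstep] at hfold
      obtain ⟨h1, h2, h3⟩ := ih (a - 1) b (by omega) req cur d (by omega) req' c d' hfold
      refine ⟨h1, ?_, ?_⟩
      · rcases h2 with ⟨hceq, hnone⟩ | ⟨hm, hb, ha, hlb⟩
        · refine Or.inl ⟨hceq, fun r hr hrc => ?_⟩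
          by_cases hr_a : r = a
          · exact hmem (hr_a ▸ hr)
          · exact hnone r hr ⟨hrc.1, by omega⟩
        · refine Or.inr ⟨hm, hb, by omega, fun r hr hbr hra => ?_⟩
          by_cases hr_a : r = a
          · exact absurd (hr_a ▸ hr) hmem
          · exact hlb r hr hbr (by omega)
      · intro j
        have hcj := h3 j
        by_cases hja : j = a
        · rw [hja] at hcj ⊢
          rw [if_neg (fun h => by omega)] at hcj
          rw [if_neg (fun h => hmem h.2.2)]
          exact hcj
        · by_cases hcond : b < j ∧ j ≤ a ∧ j ∈ req
          · rw [if_pos ⟨hcond.1, by omega, hcond.2.2⟩] at hcj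
            rw [if_pos hcond]
            exact hcj
          · rw [if_neg (fun h => hcond ⟨h.1, by omega, h.2.2⟩)] at hcj
            rw [if_neg hcond]
            exact hcj

theorem CLOOK_simul_spec : Claim_equal_CLOOK_simul := by
  intro req head _hdom hpre
  obtain ⟨hne, hcnt⟩ := hpre
  unfold Spec_CLOOK_simul
  obtain ⟨mx, hmx⟩ : ∃ m, PySem.List.max? req (fun x => x) = some m := by
    cases h : PySem.List.max? req (fun x => x) with
    | none => exact absurd ((PySem.List.max?_eq_none_iff _ _).mp h) hne
    | some m => exact ⟨m, rfl⟩
  obtain ⟨mn, hmn⟩ : ∃ m, PySem.List.min? req (fun x => x) = some m := by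
    cases h : PySem.List.min? req (fun x => x) with
    | none => exact absurd ((PySem.List.min?_eq_none_iff _ _).mp h) hne
    | some m => exact ⟨m, rfl⟩
  have hmx_ub : ∀ y ∈ req, y ≤ mx := fun y hy => PySem.List.max?_isMax hmx y hy
  have hmn_lb : ∀ y ∈ req, mn ≤ y := fun y hy => PySem.List.min?_isMin hmn y hy
  have hmx_mem : mx ∈ req := PySem.List.max?_mem hmx
  have hmn_mem : mn ∈ req := PySem.List.min?_mem hmn
  rcases hfold1 : (PySem.List.pyRange head (mn - 1) (-1)).foldl pvStep (req, head, 0)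
    with ⟨req1, c1, dd1⟩
  obtain ⟨hd1, hc1, hcount1⟩ := pvLoop_spec ((head - (mn - 1)).toNat) head (mn - 1) rfl
    req head 0 le_rfl req1 c1 dd1 hfold1
  rcases hfold2 : (PySem.List.pyRange mx (head - 1) (-1)).foldl pvStep (req1, mx, dd1 + |c1 - mx|)
    with ⟨req2, c2, dd2⟩
  obtain ⟨hd2, hc2, _⟩ := pvLoop_spec ((mx - (head - 1)).toNat) mx (head - 1) rfl
    req1 mx (dd1 + |c1 - mx|) le_rfl req2 c2 dd2 hfold2
  have hA : CLOOK_simul req head = dd2 := by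
    simp only [CLOOK_simul, hmx, hmn, Option.getD_some, hfold1, hfold2]
  -- membership in req1 for positions at or above head
  have hmem1 : ∀ j : Int, head ≤ j → (j ∈ req1 ↔ (head < j ∧ j ∈ req)) := by
    intro j hj
    have hcj := hcount1 j
    by_cases hlt : head < j
    · rw [if_neg (fun h => by omega)] at hcj
      have e1 : (j ∈ req1) ↔ (j ∈ req) := by
        rw [← List.count_pos_iff, ← List.count_pos_iff]; omega
      exact ⟨fun h => ⟨hlt, e1.mp h⟩, fun h => e1.mpr h.2⟩
    · have hje : j = head := by omega
      rw [hje] at hcj ⊢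
      constructor
      · intro hmemh
        exfalso
        have hpos := List.count_pos_iff.mpr hmemh
        by_cases hh : head ∈ req
        · have h1 : mn ≤ head := hmn_lb head hh
          rw [if_pos ⟨by omega, le_refl head, hh⟩] at hcj
          have := List.count_pos_iff.mpr hh
          omega
        · have h0 : req.count head = 0 := List.count_eq_zero.mpr hh
          rw [if_neg (fun h => hh h.2.2)] at hcj
          omega
      · intro h; omega
  have habs : |c1 - mx| = mx - c1 → dd2 = (head - c1) + (mx - c1) + (mx - c2) := by
    intro h; rw [h] at hd2; omega
  rw [hA]
  by_cases hlow : req.filter (fun r => decide (r ≤ head)) = []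
  · have hnolow : ∀ r ∈ req, ¬ r ≤ head := by
      intro r hr hrle
      have := List.filter_eq_nil_iff.mp hlow r hr
      simp [hrle] at this
    have hc1v : c1 = head := by
      rcases hc1 with ⟨h, _⟩ | ⟨hm, _, hle, _⟩
      · exact h
      · exact absurd hle (hnolow c1 hm)
    have hheadmn : head < mn := by
      have := hnolow mn hmn_mem; omega
    have hd2' : dd2 = (head - c1) + (mx - c1) + (mx - c2) := by
      apply habs
      have : c1 ≤ mx := by have := hmx_ub mn hmn_mem; omega
      rw [abs_of_nonpos (by omega)]; ring
    by_cases hhigh : req.filter (fun r => decide (head < r)) = []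
    · exfalso
      obtain ⟨r, hr⟩ := List.exists_mem_of_ne_nil req hne
      have h1 := hnolow r hr
      have h2 := List.filter_eq_nil_iff.mp hhigh r hr
      simp at h2
      omega
    · obtain ⟨m2, hminhigh⟩ :
          ∃ m, PySem.List.min? (req.filter (fun r => decide (head < r))) (fun x => x) = some m := by
        cases h : PySem.List.min? (req.filter (fun r => decide (head < r))) (fun x => x) with
        | none => exact absurd ((PySem.List.min?_eq_none_iff _ _).mp h) hhigh
        | some m => exact ⟨m, rfl⟩
      have hm2f := List.mem_filter.mp (PySem.List.min?_mem hminhigh)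
      have hm2mem : m2 ∈ req := hm2f.1
      have hm2gt : head < m2 := by have := hm2f.2; simpa using this
      have hc2v : c2 = m2 := by
        rcases hc2 with ⟨hceq, hnone⟩ | ⟨hm, hb, hle, hlb⟩
        · exact absurd ⟨by omega, hmx_ub m2 hm2mem⟩
            (hnone m2 ((hmem1 m2 (by omega)).mpr ⟨hm2gt, hm2mem⟩))
        · have hc2req : head < c2 ∧ c2 ∈ req := (hmem1 c2 (by omega)).mp hm
          refine le_antisymm
            (hlb m2 ((hmem1 m2 (by omega)).mpr ⟨hm2gt, hm2mem⟩) (by omega) (hmx_ub m2 hm2mem)) ?_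
          exact PySem.List.min?_isMin hminhigh c2
            (List.mem_filter.mpr ⟨hc2req.2, by simpa using hc2req.1⟩)
      have hB : CLOOK_simul_alt req head =
          (head - head) + (mx - head) + (mx - m2) := by
        simp only [CLOOK_simul_alt, hmx, Option.getD_some]
        rw [if_pos hlow, if_neg hhigh, hminhigh, Option.getD_some]
      rw [hB]; omega
  · obtain ⟨m1, hminlow⟩ :
        ∃ m, PySem.List.min? (req.filter (fun r => decide (r ≤ head))) (fun x => x) = some m := by
      cases h : PySem.List.min? (req.filter (fun r => decide (r ≤ head))) (fun x => x) with
      | none => exact absurd ((PySem.List.min?_eq_none_iff _ _).mp h) hlow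
      | some m => exact ⟨m, rfl⟩
    have hm1f := List.mem_filter.mp (PySem.List.min?_mem hminlow)
    have hm1mem : m1 ∈ req := hm1f.1
    have hm1le : m1 ≤ head := by have := hm1f.2; simpa using this
    have hc1v : c1 = m1 := by
      rcases hc1 with ⟨hceq, hnone⟩ | ⟨hm, hb, hle, hlb⟩
      · exact absurd ⟨by have := hmn_lb m1 hm1mem; omega, hm1le⟩ (hnone m1 hm1mem)
      · refine le_antisymm
          (hlb m1 hm1mem (by have := hmn_lb m1 hm1mem; omega) hm1le) ?_
        exact PySem.List.min?_isMin hminlow c1 (List.mem_filter.mpr ⟨hm, by simpa using hle⟩)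
    have hd2' : dd2 = (head - c1) + (mx - c1) + (mx - c2) := by
      apply habs
      have : c1 ≤ mx := by have := hmx_ub m1 hm1mem; omega
      rw [abs_of_nonpos (by omega)]; ring
    by_cases hhigh : req.filter (fun r => decide (head < r)) = []
    · have hnohigh : ∀ r ∈ req, ¬ head < r := by
        intro r hr hrgt
        have := List.filter_eq_nil_iff.mp hhigh r hr
        simp [hrgt] at this
      have hc2v : c2 = mx := by
        rcases hc2 with ⟨h, _⟩ | ⟨hm, hb, _, _⟩
        · exact h
        · have := (hmem1 c2 (by omega)).mp hm
          exact absurd this.1 (hnohigh c2 this.2)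
      have hB : CLOOK_simul_alt req head = (head - m1) + (mx - m1) := by
        simp only [CLOOK_simul_alt, hmx, Option.getD_some]
        rw [if_neg hlow, hminlow, Option.getD_some, if_pos hhigh]
      rw [hB]; omega
    · obtain ⟨m2, hminhigh⟩ :
          ∃ m, PySem.List.min? (req.filter (fun r => decide (head < r))) (fun x => x) = some m := by
        cases h : PySem.List.min? (req.filter (fun r => decide (head < r))) (fun x => x) with
        | none => exact absurd ((PySem.List.min?_eq_none_iff _ _).mp h) hhigh
        | some m => exact ⟨m, rfl⟩
      have hm2f := List.mem_filter.mp (PySem.List.min?_mem hminhigh)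
      have hm2mem : m2 ∈ req := hm2f.1
      have hm2gt : head < m2 := by have := hm2f.2; simpa using this
      have hc2v : c2 = m2 := by
        rcases hc2 with ⟨hceq, hnone⟩ | ⟨hm, hb, hle, hlb⟩
        · exact absurd ⟨by omega, hmx_ub m2 hm2mem⟩
            (hnone m2 ((hmem1 m2 (by omega)).mpr ⟨hm2gt, hm2mem⟩))
        · have hc2req : head < c2 ∧ c2 ∈ req := (hmem1 c2 (by omega)).mp hm
          refine le_antisymm
            (hlb m2 ((hmem1 m2 (by omega)).mpr ⟨hm2gt, hm2mem⟩) (by omega) (hmx_ub m2 hm2mem)) ?_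
          exact PySem.List.min?_isMin hminhigh c2
            (List.mem_filter.mpr ⟨hc2req.2, by simpa using hc2req.1⟩)
      have hB : CLOOK_simul_alt req head = (head - m1) + (mx - m1) + (mx - m2) := by
        simp only [CLOOK_simul_alt, hmx, Option.getD_some]
        rw [if_neg hlow, hminlow, Option.getD_some, if_neg hhigh, hminhigh, Option.getD_some]
      rw [hB]; omega
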